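-- pv_equiv track=rewrite | github.com/leesewon00/Linear-Algebra | cse2105_pset01.py | changeRowWithPriority
-- ===== SOURCE A (Python) =====
-- def changeRowWithPriority(matrix):
--     d = {}
--     for i in range(len(matrix)):
--         flag = True
--
--         for j in range(len(matrix[i])):
--             if matrix[i][j] != 0:
--                 if j in d.keys():
--                     d[j].append(i)
--                 else:
--                     d[j] = list()
--                     d[j].append(i)
--                 flag = False
--                 break
--
--         if flag:
--             if len(matrix[i]) in d.keys():
--                 d[len(matrix[i])].append(i)
--             else:
--                 d[len(matrix[i])] = list()
--                 d[len(matrix[i])].append(i)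
--
--     # swap
--     sorted_list = sorted(d.keys())
--     li = []
--     for i in sorted_list:
--         for j in d[i]:
--             li.append(matrix[j])
--     matrix = li.copy()
--     return matrix
-- ===== SOURCE B (Python) =====
-- def changeRowWithPriority(matrix):
--     def lead(row):
--         k = 0
--         for v in row:
--             if v != 0:
--                 return k
--             k += 1
--         return k
--     return sorted(matrix, key=lead)
-- ===== Notes on version B (the rewrite author's own statement) =====
-- stated objective: simpler
-- what changed: Replaced the dict-of-index-buckets grouping plus sorted-keys concatenation with a single stable sorted(matrix, key=first-nonzero-column-or-row-length) call.
import Mathlib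
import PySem

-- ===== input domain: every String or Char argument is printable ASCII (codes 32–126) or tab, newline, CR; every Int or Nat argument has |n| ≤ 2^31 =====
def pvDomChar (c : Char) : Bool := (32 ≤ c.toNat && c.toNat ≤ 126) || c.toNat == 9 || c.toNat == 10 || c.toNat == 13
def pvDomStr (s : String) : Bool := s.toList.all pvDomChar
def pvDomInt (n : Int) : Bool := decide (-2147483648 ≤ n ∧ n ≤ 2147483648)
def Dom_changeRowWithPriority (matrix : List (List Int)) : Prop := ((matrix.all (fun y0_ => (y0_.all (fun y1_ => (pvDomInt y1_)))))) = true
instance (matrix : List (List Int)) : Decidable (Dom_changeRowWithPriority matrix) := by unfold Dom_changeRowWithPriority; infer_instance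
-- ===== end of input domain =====

-- B replaces A's dict-of-buckets grouping + sorted-keys concatenation by one stable sort
-- of the rows keyed on the leading-nonzero column (or row length); objective: simpler.


-- ===== PORT A =====
-- A's inner 'for j in range(len(matrix[i])): if matrix[i][j] != 0: … break' loop:
-- first index j whose entry is nonzero (none = loop exhausted, flag stayed True)
def pvFirstNZ : List Int → Int → Option Int
  | [], _ => none
  | v :: t, j => if v ≠ 0 then some j else pvFirstNZ t (j + 1)

def changeRowWithPriority (matrix : List (List Int)) : List (List Int) :=
  -- d[key] gets row index i appended (new key: fresh list then append = modify with default [])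
  let d : PySem.Dict Int (List Int) :=
    (PySem.List.enumerate matrix 0).foldl
      (fun d p =>
        match pvFirstNZ p.2 0 with
        | some j => d.modify j [] (fun l => l ++ [p.1])
        | none => d.modify ((p.2.length : Int)) [] (fun l => l ++ [p.1]))
      PySem.Dict.empty
  let sortedList := PySem.List.sorted d.keys (fun k => k) false
  sortedList.foldl
    (fun li k => (d.getD k []).foldl (fun li j => li ++ [PySem.List.pyGetD matrix j []]) li) []

-- ===== PORT B =====
-- Source B's key: index of the first nonzero entry, or len(row) when the loop falls through
def pvLead : List Int → Int → Int
  | [], k => k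
  | v :: t, k => if v ≠ 0 then k else pvLead t (k + 1)

def changeRowWithPriority_alt (matrix : List (List Int)) : List (List Int) :=
  PySem.List.sorted matrix (fun row => pvLead row 0) false

-- ===== PRECONDITION & SPEC =====
def Spec_changeRowWithPriority (matrix : List (List Int)) (out : List (List Int)) : Prop := out = changeRowWithPriority_alt matrix
instance (matrix : List (List Int)) (out : List (List Int)) : Decidable (Spec_changeRowWithPriority matrix out) := by unfold Spec_changeRowWithPriority; infer_instance

-- ===== CLAIM (what is proved, stated in full; the proofs are below) =====
def Claim_equal_changeRowWithPriority : Prop := ∀ (matrix : List (List Int)), Dom_changeRowWithPriority matrix → Spec_changeRowWithPriority matrix (changeRowWithPriority matrix)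

-- ===== LEMMAS AND PROOFS =====

-- the common key function, named for the proofs
def pvKey (r : List Int) : Int := pvLead r 0

-- A's match on the inner-loop result computes pvLead
theorem pvLead_eq (r : List Int) (j : Int) :
    (match pvFirstNZ r j with | some x => x | none => j + (r.length : Int)) = pvLead r j := by
  induction r generalizing j with
  | nil => simp [pvFirstNZ, pvLead]
  | cons v t ih =>
    by_cases hv : v ≠ 0
    · simp [pvFirstNZ, pvLead, hv]
    · simp only [pvFirstNZ, pvLead, hv, ite_false]
      rw [← ih (j + 1)]
      cases hm : pvFirstNZ t (j + 1)
      · simp only [hm, List.length_cons]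
        push_cast
        ring
      · simp only [hm]

theorem stepA_eq (d : PySem.Dict Int (List Int)) (p : Int × List Int) :
    (match pvFirstNZ p.2 0 with
     | some j => d.modify j [] (fun l => l ++ [p.1])
     | none => d.modify ((p.2.length : Int)) [] (fun l => l ++ [p.1]))
    = d.modify (pvKey p.2) [] (fun l => l ++ [p.1]) := by
  have h := pvLead_eq p.2 0
  cases hm : pvFirstNZ p.2 0 with
  | none =>
    simp only [hm] at h ⊢
    have h2 : ((p.2.length : Int)) = pvKey p.2 := by
      unfold pvKey
      rw [← h]
      ring
    rw [h2]
  | some j =>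
    simp only [hm] at h ⊢
    rw [show j = pvKey p.2 from h]

-- the dict A builds, in closed form
def pvDictA (matrix : List (List Int)) : PySem.Dict Int (List Int) :=
  (PySem.List.enumerate matrix 0).foldl
    (fun d p => d.modify (pvKey p.2) [] (fun l => l ++ [p.1])) PySem.Dict.empty

theorem pvDictA_getD (matrix : List (List Int)) (k : Int) :
    (pvDictA matrix).getD k [] =
      ((PySem.List.enumerate matrix 0).filter (fun p => pvKey p.2 == k)).map (fun p => p.1) := by
  have := PySem.Dict.getD_foldl_modify_append
    ((PySem.List.enumerate matrix 0).map (fun p => (pvKey p.2, p.1)))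
    (PySem.Dict.empty : PySem.Dict Int (List Int)) k
  rw [List.foldl_map] at this
  rw [pvDictA, this, PySem.Dict.getD_empty, List.nil_append, List.filter_map, List.map_map]
  rfl

theorem pvDictA_keys (matrix : List (List Int)) :
    (pvDictA matrix).keys = PySem.Set.ofList (matrix.map pvKey) := by
  rw [pvDictA, PySem.Dict.keys_foldl_modify_key (PySem.List.enumerate matrix 0)
      (fun p => pvKey p.2) [] (fun _ p => fun l => l ++ [p.1])]
  rw [PySem.Dict.keys_empty]
  rw [show (PySem.List.enumerate matrix 0).map (fun p => pvKey p.2)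
        = ((PySem.List.enumerate matrix 0).map (fun p => p.2)).map pvKey by
      rw [List.map_map]; rfl]
  rw [PySem.List.map_snd_enumerate]
  rfl

-- filtering an enumeration on the row and projecting back the row is filtering the rows
theorem map_snd_filter_enumerate (q : List Int → Bool) (matrix : List (List Int)) (s : Int) :
    ((PySem.List.enumerate matrix s).filter (fun p => q p.2)).map (fun p => p.2)
      = matrix.filter q := by
  induction matrix generalizing s with
  | nil => rfl
  | cons r t ih =>
    rw [PySem.List.enumerate_cons, List.filter_cons, List.filter_cons]
    by_cases h : q r
    · simp only [h, if_pos, List.map_cons]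
      rw [ih]
    · simp only [h]
      rw [if_neg (by simp), if_neg (by simp), ih]

-- A in grouped closed form
theorem A_eq_grouped (matrix : List (List Int)) :
    changeRowWithPriority matrix =
      (PySem.List.sorted (PySem.Set.ofList (matrix.map pvKey)) (fun k => k) false).flatMap
        (fun k => matrix.filter (fun r => pvKey r == k)) := by
  have hd : (PySem.List.enumerate matrix 0).foldl
      (fun d p =>
        match pvFirstNZ p.2 0 with
        | some j => d.modify j [] (fun l => l ++ [p.1])
        | none => d.modify ((p.2.length : Int)) [] (fun l => l ++ [p.1]))
      PySem.Dict.empty = pvDictA matrix := by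
    rw [pvDictA]
    apply PySem.List.foldl_congr_mem
    intro d p _
    exact stepA_eq d p
  rw [changeRowWithPriority]
  simp only [hd, pvDictA_keys]
  simp only [PySem.List.foldl_append_singleton_eq_map]
  rw [show (fun (li : List (List Int)) k => li ++ ((pvDictA matrix).getD k []).map
        (fun j => PySem.List.pyGetD matrix j []))
      = (fun li k => li ++ (fun k => ((pvDictA matrix).getD k []).map
        (fun j => PySem.List.pyGetD matrix j [])) k) from rfl]
  rw [PySem.List.foldl_append_eq_flatMap]
  rw [List.nil_append]
  congr 1
  funext k
  rw [pvDictA_getD, List.map_map]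
  have hmem : ∀ p ∈ (PySem.List.enumerate matrix 0).filter (fun p => pvKey p.2 == k),
      ((fun j => PySem.List.pyGetD matrix j []) ∘ fun p => p.1) p = p.2 := by
    intro p hp
    have hp' := List.mem_of_mem_filter hp
    rw [PySem.List.mem_enumerate_iff] at hp'
    obtain ⟨i, hi, rfl⟩ := hp'
    simp [PySem.List.pyGetD_natCast, List.getElem?_eq_getElem hi]
  rw [List.map_congr_left hmem]
  exact map_snd_filter_enumerate (fun r => pvKey r == k) matrix 0

-- insertBy places x after every element whose key is not greater, before the rest
theorem insertBy_append (x : List Int) (l r : List (List Int))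
    (hl : ∀ y ∈ l, ¬ pvKey x < pvKey y) (hr : ∀ y ∈ r, pvKey x < pvKey y) :
    PySem.List.insertBy (fun a b => decide (pvKey a < pvKey b)) x (l ++ r) = l ++ x :: r := by
  induction l with
  | nil =>
    cases r with
    | nil => rfl
    | cons h t => simp [PySem.List.insertBy, hr h (List.mem_cons_self)]
  | cons y l ih =>
    simp only [List.cons_append, PySem.List.insertBy]
    rw [if_neg (by simpa using hl y List.mem_cons_self)]
    rw [ih (fun z hz => hl z (List.mem_cons_of_mem _ hz))]

-- in a strictly increasing list not containing kx, everything dropWhile (< kx) keeps is > kx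
theorem dropWhile_gt (S : List Int) (kx : Int) (hpw : S.Pairwise (· < ·)) (hnm : kx ∉ S) :
    ∀ k ∈ S.dropWhile (fun k => decide (k < kx)), kx < k := by
  induction S with
  | nil => simp
  | cons a S ih =>
    rw [List.pairwise_cons] at hpw
    intro k hk
    rw [List.dropWhile_cons] at hk
    by_cases ha : a < kx
    · rw [if_pos (by simpa using ha)] at hk
      exact ih hpw.2 (fun h => hnm (List.mem_cons_of_mem _ h)) k hk
    · rw [if_neg (by simpa using ha)] at hk
      have hakx : kx < a := lt_of_le_of_ne (not_lt.mp ha) (fun h => hnm (h ▸ List.mem_cons_self))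
      rcases List.mem_cons.mp hk with rfl | hk
      · exact hakx
      · exact hakx.trans (hpw.1 k hk)

theorem flatMap_congr' {α β : Type} (l : List α) (f g : α → List β)
    (h : ∀ k ∈ l, f k = g k) : l.flatMap f = l.flatMap g := by
  induction l with
  | nil => rfl
  | cons a l ih =>
    rw [List.flatMap_cons, List.flatMap_cons, h a List.mem_cons_self,
      ih (fun k hk => h k (List.mem_cons_of_mem _ hk))]

-- members of a group have its key
theorem key_of_mem_filter (xs : List (List Int)) (k : Int) (r : List Int)
    (h : r ∈ xs.filter (fun r => pvKey r == k)) : pvKey r = k := by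
  have := List.of_mem_filter h
  simpa using this

-- THE stability lemma: the stable sort is the sorted-keys concatenation of the groups
theorem sorted_grouped (xs : List (List Int)) :
    PySem.List.sorted xs pvKey false =
      (PySem.List.sorted (PySem.Set.ofList (xs.map pvKey)) (fun k => k) false).flatMap
        (fun k => xs.filter (fun r => pvKey r == k)) := by
  induction xs using List.reverseRecOn with
  | nil => rfl
  | append_singleton xs x ih =>
    have hL : PySem.List.sorted (xs ++ [x]) pvKey false =
        PySem.List.insertBy (fun a b => decide (pvKey a < pvKey b)) x
          (PySem.List.sorted xs pvKey false) := by
      rw [PySem.List.sorted_eq_foldl_insertBy, PySem.List.sorted_eq_foldl_insertBy,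
        List.foldl_append, List.foldl_cons, List.foldl_nil]
    have hK : PySem.Set.ofList ((xs ++ [x]).map pvKey)
        = PySem.Set.add (PySem.Set.ofList (xs.map pvKey)) (pvKey x) := by
      rw [List.map_append, List.map_singleton, PySem.Set.ofList_eq_foldl,
        PySem.Set.ofList_eq_foldl, List.foldl_append, List.foldl_cons, List.foldl_nil]
    have hF' : ∀ k, (xs ++ [x]).filter (fun r => pvKey r == k)
        = xs.filter (fun r => pvKey r == k) ++ (if pvKey x = k then [x] else []) := by
      intro k
      rw [List.filter_append]
      congr 1
      by_cases h : pvKey x = k <;> simp [h]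
    rw [hL, ih, hK]
    set K := PySem.Set.ofList (xs.map pvKey) with hKdef
    set S := PySem.List.sorted K (fun k => k) false with hSdef
    have hpwS : S.Pairwise (· < ·) := PySem.List.sorted_ofList_pairwise_lt (xs.map pvKey)
    by_cases hmem : pvKey x ∈ K
    · -- existing key: the dict keeps its key set; x joins the end of its group
      rw [PySem.Set.add_of_mem hmem]
      have hSx : pvKey x ∈ S := (PySem.List.mem_sorted _ _ _ _).mpr hmem
      obtain ⟨P, Q, hPQ⟩ := List.append_of_mem hSx
      have hpw' := hPQ ▸ hpwS
      rw [List.pairwise_append] at hpw'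
      have hP : ∀ a ∈ P, a < pvKey x := fun a ha => hpw'.2.2 a ha _ List.mem_cons_self
      have hQ : ∀ b ∈ Q, pvKey x < b := (List.pairwise_cons.mp hpw'.2.1).1
      have hins : PySem.List.insertBy (fun a b => decide (pvKey a < pvKey b)) x
          (S.flatMap (fun k => xs.filter (fun r => pvKey r == k)))
          = P.flatMap (fun k => xs.filter (fun r => pvKey r == k)) ++
            (xs.filter (fun r => pvKey r == pvKey x) ++
              x :: Q.flatMap (fun k => xs.filter (fun r => pvKey r == k))) := by
        rw [hPQ, List.flatMap_append, List.flatMap_cons, ← List.append_assoc]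
        rw [insertBy_append x _ _
          (by
            intro y hy
            rcases List.mem_append.mp hy with hy | hy
            · obtain ⟨k, hk, hyk⟩ := List.mem_flatMap.mp hy
              rw [key_of_mem_filter xs k y hyk]
              exact not_lt.mpr (le_of_lt (hP k hk))
            · rw [key_of_mem_filter xs (pvKey x) y hy]
              exact lt_irrefl _
          )
          (by
            intro y hy
            obtain ⟨k, hk, hyk⟩ := List.mem_flatMap.mp hy
            rw [key_of_mem_filter xs k y hyk]
            exact hQ k hk
          )]
        simp [List.append_assoc]
      have hRHS : (P ++ pvKey x :: Q).flatMap
            (fun k => (xs ++ [x]).filter (fun r => pvKey r == k))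
          = P.flatMap (fun k => xs.filter (fun r => pvKey r == k)) ++
            (xs.filter (fun r => pvKey r == pvKey x) ++
              x :: Q.flatMap (fun k => xs.filter (fun r => pvKey r == k))) := by
        rw [List.flatMap_append, List.flatMap_cons]
        rw [flatMap_congr' P (fun k => (xs ++ [x]).filter (fun r => pvKey r == k))
          (fun k => xs.filter (fun r => pvKey r == k))
          (fun k hk => by
            show List.filter (fun r => pvKey r == k) (xs ++ [x])
              = List.filter (fun r => pvKey r == k) xs
            rw [hF' k, if_neg (ne_of_gt (hP k hk)), List.append_nil])]
        rw [flatMap_congr' Q (fun k => (xs ++ [x]).filter (fun r => pvKey r == k))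
          (fun k => xs.filter (fun r => pvKey r == k))
          (fun k hk => by
            show List.filter (fun r => pvKey r == k) (xs ++ [x])
              = List.filter (fun r => pvKey r == k) xs
            rw [hF' k, if_neg (ne_of_lt (hQ k hk)), List.append_nil])]
        rw [hF' (pvKey x), if_pos rfl]
        simp [List.append_assoc]
      rw [hins, ← hSdef, hPQ, hRHS]
    · -- new key: its singleton group is spliced in at the sorted position
      have hFx : xs.filter (fun r => pvKey r == pvKey x) = [] := by
        rw [List.filter_eq_nil_iff]
        intro r hr hb
        exact hmem (hKdef ▸ (PySem.Set.mem_ofList _ _).mpr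
          (List.mem_map.mpr ⟨r, hr, (by simpa using hb)⟩))
      set P := S.takeWhile (fun k => decide (k < pvKey x)) with hPdef
      set Q := S.dropWhile (fun k => decide (k < pvKey x)) with hQdef
      have hPQ : P ++ Q = S := List.takeWhile_append_dropWhile
      have hP : ∀ a ∈ P, a < pvKey x := fun a ha => by
        simpa using List.mem_takeWhile_imp ha
      have hnmS : pvKey x ∉ S := fun h => hmem ((PySem.List.mem_sorted _ _ _ _).mp h)
      have hQ : ∀ b ∈ Q, pvKey x < b := dropWhile_gt S (pvKey x) hpwS hnmS
      have hS' : PySem.List.sorted (PySem.Set.add K (pvKey x)) (fun k => k) false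
          = P ++ pvKey x :: Q := by
        apply PySem.List.sorted_eq_of_perm_of_pairwise_lt
        · rw [PySem.Set.add_of_not_mem hmem]
          refine (List.perm_middle).trans ?_
          rw [hPQ]
          refine (((PySem.List.sorted_perm K (fun k => k) false)).cons (pvKey x)).trans ?_
          simpa using (List.perm_middle (a := pvKey x) (l₁ := K) (l₂ := [])).symm
        · have hsubP : P.Sublist S := by
            rw [hPdef]
            exact List.takeWhile_sublist _
          have hsubQ : Q.Sublist S := by
            rw [hQdef]
            exact List.dropWhile_sublist _
          rw [List.pairwise_append]
          refine ⟨hpwS.sublist hsubP,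
            List.pairwise_cons.mpr ⟨hQ, hpwS.sublist hsubQ⟩,
            fun a ha b hb => ?_⟩
          rcases List.mem_cons.mp hb with rfl | hb
          · exact hP a ha
          · exact (hP a ha).trans (hQ b hb)
      have hins : PySem.List.insertBy (fun a b => decide (pvKey a < pvKey b)) x
          (S.flatMap (fun k => xs.filter (fun r => pvKey r == k)))
          = P.flatMap (fun k => xs.filter (fun r => pvKey r == k)) ++
            x :: Q.flatMap (fun k => xs.filter (fun r => pvKey r == k)) := by
        rw [← hPQ, List.flatMap_append]
        rw [insertBy_append x _ _
          (by
            intro y hy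
            obtain ⟨k, hk, hyk⟩ := List.mem_flatMap.mp hy
            rw [key_of_mem_filter xs k y hyk]
            exact not_lt.mpr (le_of_lt (hP k hk))
          )
          (by
            intro y hy
            obtain ⟨k, hk, hyk⟩ := List.mem_flatMap.mp hy
            rw [key_of_mem_filter xs k y hyk]
            exact hQ k hk
          )]
      have hRHS : (P ++ pvKey x :: Q).flatMap
            (fun k => (xs ++ [x]).filter (fun r => pvKey r == k))
          = P.flatMap (fun k => xs.filter (fun r => pvKey r == k)) ++
            x :: Q.flatMap (fun k => xs.filter (fun r => pvKey r == k)) := by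
        rw [List.flatMap_append, List.flatMap_cons]
        rw [flatMap_congr' P (fun k => (xs ++ [x]).filter (fun r => pvKey r == k))
          (fun k => xs.filter (fun r => pvKey r == k))
          (fun k hk => by
            show List.filter (fun r => pvKey r == k) (xs ++ [x])
              = List.filter (fun r => pvKey r == k) xs
            rw [hF' k, if_neg (ne_of_gt (hP k hk)), List.append_nil])]
        rw [flatMap_congr' Q (fun k => (xs ++ [x]).filter (fun r => pvKey r == k))
          (fun k => xs.filter (fun r => pvKey r == k))
          (fun k hk => by
            show List.filter (fun r => pvKey r == k) (xs ++ [x])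
              = List.filter (fun r => pvKey r == k) xs
            rw [hF' k, if_neg (ne_of_lt (hQ k hk)), List.append_nil])]
        rw [hF' (pvKey x), if_pos rfl, hFx]
        simp
      rw [hS', hRHS, hins]

-- ===== VERDICT (by name: the statement is the Claim_ definition above) =====
theorem changeRowWithPriority_spec : Claim_equal_changeRowWithPriority := by
  intro matrix _
  unfold Spec_changeRowWithPriority changeRowWithPriority_alt
  rw [show (fun row => pvLead row 0) = pvKey from rfl]
  rw [A_eq_grouped, sorted_grouped]
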